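-- pv_equiv track=rewrite | github.com/blegloannec/CodeProblems | HackerRank/basic_cryptanalysis.py | update
-- ===== SOURCE A (Python) =====
-- def update(S0,w1,w2):
--     S = S0.copy()
--     for a,b in zip(w1,w2):
--         if a in S and S[a]!=b:
--             return None
--         else:
--             S[a] = b
--     return S
-- ===== SOURCE B (Python) =====
-- def update(S0, w1, w2):
--     # distinct (letter, image) constraints demanded by the word pair
--     pairs = set(zip(w1, w2))
--     consistent = all(b2 == b for (a, b) in pairs for (a2, b2) in pairs if a2 == a) \
--         and all(S0[a] == b for (a, b) in pairs if a in S0)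
--     if not consistent:
--         return None
--     S = S0.copy()
--     S.update(zip(w1, w2))
--     return S
-- ===== Notes on version B (the rewrite author's own statement) =====
-- stated objective: alternative
-- what changed: B extracts the set of distinct (letter,image) constraints, verifies global consistency (no letter with two images, no clash with S0) and only then builds the merged dict in one bulk update, instead of A's interleaved check-and-insert scan over an evolving dict with early exit.
import Mathlib
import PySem

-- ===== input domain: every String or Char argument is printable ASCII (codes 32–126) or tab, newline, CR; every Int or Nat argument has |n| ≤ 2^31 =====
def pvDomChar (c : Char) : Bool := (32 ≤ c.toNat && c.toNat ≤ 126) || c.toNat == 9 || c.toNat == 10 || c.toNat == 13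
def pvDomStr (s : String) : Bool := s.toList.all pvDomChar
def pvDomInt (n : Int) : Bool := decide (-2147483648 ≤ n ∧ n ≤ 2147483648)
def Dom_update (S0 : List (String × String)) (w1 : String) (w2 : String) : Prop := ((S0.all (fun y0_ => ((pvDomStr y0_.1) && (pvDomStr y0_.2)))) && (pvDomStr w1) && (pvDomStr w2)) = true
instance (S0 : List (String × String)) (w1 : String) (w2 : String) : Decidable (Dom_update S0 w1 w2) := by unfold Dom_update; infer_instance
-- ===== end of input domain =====

-- B verifies all the distinct zipped constraints globally (no letter mapped to two images,
-- no clash with S0) and then builds the merged dict in one pass, instead of A's interleaved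
-- check-and-insert scan with early exit; objective: alternative (not claimed faster).

-- ===== PORT A =====
-- the loop 'for a,b in zip(w1,w2): if a in S and S[a]!=b: return None else: S[a]=b; return S'
def updGo (S : PySem.Dict String String) : List (String × String) → Option (List (String × String))
  | [] => some S.items
  | (a, b) :: rest =>
    match S.get? a with
    | some v => if v ≠ b then none else updGo (S.insert a b) rest
    | none => updGo (S.insert a b) rest

def update (S0 : List (String × String)) (w1 : String) (w2 : String) : Option (List (String × String)) :=
  -- zip(w1,w2) over Python strings yields pairs of one-character strings
  updGo (PySem.Dict.mk S0) ((w1.toList.zip w2.toList).map (fun p => (String.ofList [p.1], String.ofList [p.2])))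

-- ===== PORT B =====
def update_alt (S0 : List (String × String)) (w1 : String) (w2 : String) : Option (List (String × String)) :=
  let zs := (w1.toList.zip w2.toList).map (fun p => (String.ofList [p.1], String.ofList [p.2]))
  let pairs : PySem.Set (String × String) := PySem.Set.ofList zs
  let d0 := PySem.Dict.mk S0
  let consistent :=
    (pairs.all (fun p => pairs.all (fun q => !(q.1 == p.1) || (q.2 == p.2)))) &&
    (pairs.all (fun p => match d0.get? p.1 with | some v => v == p.2 | none => true))
  if consistent then
    some ((zs.foldl (fun d p => d.insert p.1 p.2) d0).items)
  else
    none

-- ===== PRECONDITION & SPEC =====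
def Spec_update (S0 : List (String × String)) (w1 : String) (w2 : String) (out : Option (List (String × String))) : Prop := out = update_alt S0 w1 w2
instance (S0 : List (String × String)) (w1 : String) (w2 : String) (out : Option (List (String × String))) : Decidable (Spec_update S0 w1 w2 out) := by unfold Spec_update; infer_instance

-- ===== CLAIM (what is proved, stated in full; the proofs are below) =====
def Claim_equal_update : Prop := ∀ (S0 : List (String × String)) (w1 : String) (w2 : String), Dom_update S0 w1 w2 → Spec_update S0 w1 w2 (update S0 w1 w2)

-- ===== LEMMAS AND PROOFS =====

-- Bool versions of B's two checks, over a plain list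
def okP (zs : List (String × String)) : Bool :=
  zs.all (fun p => zs.all (fun q => !(q.1 == p.1) || (q.2 == p.2)))

def okD (d : PySem.Dict String String) (zs : List (String × String)) : Bool :=
  zs.all (fun p => match d.get? p.1 with | some v => v == p.2 | none => true)

lemma okP_iff (zs : List (String × String)) :
    okP zs = true ↔ ∀ p ∈ zs, ∀ q ∈ zs, q.1 = p.1 → q.2 = p.2 := by
  simp only [okP, List.all_eq_true, Prod.forall]
  constructor <;> intro h a b hab a2 b2 h2 <;> have := h a b hab a2 b2 h2 <;>
    simp at this ⊢ <;> tauto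

lemma okD_iff (d : PySem.Dict String String) (zs : List (String × String)) :
    okD d zs = true ↔ ∀ p ∈ zs, ∀ v, d.get? p.1 = some v → v = p.2 := by
  simp only [okD, List.all_eq_true]
  constructor
  · intro h p hp v hv
    have := h p hp
    rw [hv] at this
    simpa using this
  · intro h p hp
    cases hg : d.get? p.1 with
    | none => simp
    | some v => simpa using h p hp v hg

-- an 'all' over the distinct elements equals the 'all' over the original list
lemma all_ofList {α : Type} [BEq α] [LawfulBEq α] (l : List α) (f : α → Bool) :
    (PySem.Set.ofList l).all f = l.all f := by
  rw [Bool.eq_iff_iff]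
  simp [List.all_eq_true, PySem.Set.mem_ofList]

-- the step equivalence: after a non-conflicting head, checking the tail against the
-- updated dict is the same as checking the whole list against the original dict
lemma step_iff (d : PySem.Dict String String) (a b : String) (rest : List (String × String))
    (h : d.get? a = none ∨ d.get? a = some b) :
    ((∀ p ∈ (a, b) :: rest, ∀ q ∈ (a, b) :: rest, q.1 = p.1 → q.2 = p.2) ∧
      (∀ p ∈ (a, b) :: rest, ∀ v, d.get? p.1 = some v → v = p.2)) ↔
    ((∀ p ∈ rest, ∀ q ∈ rest, q.1 = p.1 → q.2 = p.2) ∧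
      (∀ p ∈ rest, ∀ v, (d.insert a b).get? p.1 = some v → v = p.2)) := by
  constructor
  · rintro ⟨hP, hD⟩
    refine ⟨fun p hp q hq => hP p (by simp [hp]) q (by simp [hq]), ?_⟩
    intro p hp v hv
    by_cases hpa : p.1 = a
    · have : (d.insert a b).get? p.1 = some b := by
        rw [hpa]; exact PySem.Dict.get?_insert_self d a b
      rw [this] at hv
      cases hv
      exact hP p (by simp [hp]) (a, b) (by simp) hpa.symm
    · rw [PySem.Dict.get?_insert_of_ne d b hpa] at hv
      exact hD p (by simp [hp]) v hv
  · rintro ⟨hP, hD⟩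
    have key : ∀ p ∈ rest, p.1 = a → p.2 = b := by
      intro p hp hpa
      have : (d.insert a b).get? p.1 = some b := by
        rw [hpa]; exact PySem.Dict.get?_insert_self d a b
      exact (hD p hp b this).symm
    constructor
    · intro p hp q hq hqp
      rcases List.mem_cons.1 hp with hp | hp <;> rcases List.mem_cons.1 hq with hq | hq
      · rw [hp, hq]
      · subst hp; exact key q hq hqp
      · subst hq; exact (key p hp hqp.symm).symm
      · exact hP p hp q hq hqp
    · intro p hp v hv
      rcases List.mem_cons.1 hp with hp | hp
      · subst hp
        rcases h with h' | h' <;> simp [h'] at hv ⊢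
        exact hv.symm
      · by_cases hpa : p.1 = a
        · rcases h with h' | h'
          · rw [hpa, h'] at hv; cases hv
          · rw [hpa, h'] at hv
            cases hv
            exact (key p hp hpa).symm
        · have : (d.insert a b).get? p.1 = some v := by
            rw [PySem.Dict.get?_insert_of_ne d b hpa]; exact hv
          exact hD p hp v this

-- main characterisation of A's scan
lemma updGo_eq (zs : List (String × String)) (d : PySem.Dict String String) :
    updGo d zs =
      if okP zs && okD d zs then
        some ((zs.foldl (fun d p => d.insert p.1 p.2) d).items)
      else none := by
  induction zs generalizing d with
  | nil => simp [updGo, okP, okD]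
  | cons hd rest ih =>
    obtain ⟨a, b⟩ := hd
    cases hg : d.get? a with
    | some v =>
      by_cases hvb : v = b
      · subst hvb
        rw [show updGo d ((a, v) :: rest) = updGo (d.insert a v) rest by simp [updGo, hg]]
        rw [ih]
        have hcond : (okP rest && okD (d.insert a v) rest) = (okP ((a, v) :: rest) && okD d ((a, v) :: rest)) := by
          rw [Bool.eq_iff_iff]
          simp only [Bool.and_eq_true, okP_iff, okD_iff]
          exact (step_iff d a v rest (Or.inr hg)).symm
        rw [hcond]
        simp [List.foldl_cons]
      · rw [show updGo d ((a, b) :: rest) = none by simp [updGo, hg, hvb]]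
        have : okD d ((a, b) :: rest) = false := by
          rw [Bool.eq_false_iff]
          intro hc
          exact hvb ((okD_iff d _).1 hc (a, b) (by simp) v hg)
        simp [this]
    | none =>
      rw [show updGo d ((a, b) :: rest) = updGo (d.insert a b) rest by simp [updGo, hg]]
      rw [ih]
      have hcond : (okP rest && okD (d.insert a b) rest) = (okP ((a, b) :: rest) && okD d ((a, b) :: rest)) := by
        rw [Bool.eq_iff_iff]
        simp only [Bool.and_eq_true, okP_iff, okD_iff]
        exact (step_iff d a b rest (Or.inl hg)).symm
      rw [hcond]
      simp [List.foldl_cons]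

lemma update_eq_alt (S0 : List (String × String)) (w1 : String) (w2 : String) :
    update S0 w1 w2 = update_alt S0 w1 w2 := by
  unfold update update_alt
  rw [updGo_eq]
  simp only [all_ofList]
  rfl

-- ===== VERDICT (by name: the statement is the Claim_ definition above) =====
theorem update_spec : Claim_equal_update := by
  intro S0 w1 w2 _
  unfold Spec_update
  exact update_eq_alt S0 w1 w2
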